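-- pv_equiv track=rewrite | github.com/jonathanyulan99/SDE-Fundamentals | ALL/Formation/question_algos/limited_servings.py | limitedServings
-- ===== SOURCE A (Python) =====
-- def limitedServings(patrons: list[str], allowedServings: int) -> bool:
--     patron_drink_occurrences = {}
--
--     for patron in patrons:
--         patron_value = patron_drink_occurrences.get(patron, 0)+1
--         if patron_value > allowedServings:
--             return True
--         patron_drink_occurrences[patron] = patron_value
--
--     return False
-- ===== SOURCE B (Python) =====
-- def limitedServings(patrons: list[str], allowedServings: int) -> bool:
--     return any(patrons.count(p) > allowedServings for p in patrons)
-- ===== Notes on version B (the rewrite author's own statement) =====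
-- stated objective: simpler
-- what changed: Replaces A's fused dict-building loop with early return by a single any() over the list testing each patron's total list.count against the limit -- no dictionary at all.
import Mathlib
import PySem

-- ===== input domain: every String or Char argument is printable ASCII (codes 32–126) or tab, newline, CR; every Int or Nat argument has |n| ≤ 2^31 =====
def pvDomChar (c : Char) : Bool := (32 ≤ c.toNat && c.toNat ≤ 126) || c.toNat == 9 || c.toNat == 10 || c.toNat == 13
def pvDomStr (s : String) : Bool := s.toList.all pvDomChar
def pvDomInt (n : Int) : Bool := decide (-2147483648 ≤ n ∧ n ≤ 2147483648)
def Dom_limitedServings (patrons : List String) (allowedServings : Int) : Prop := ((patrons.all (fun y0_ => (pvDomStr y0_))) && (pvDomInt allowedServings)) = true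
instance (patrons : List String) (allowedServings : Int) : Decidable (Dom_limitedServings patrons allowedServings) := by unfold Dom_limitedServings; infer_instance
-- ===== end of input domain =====

-- B replaces A's fused dict-counting loop with early return by a single any() over total
-- list.count per patron (no dictionary); objective: simpler.

-- ===== PORT A =====
-- loop over patrons carrying the occurrence dict, with the early 'return True'
def limitedServingsGo (allowedServings : Int) (d : PySem.Dict String Int) :
    List String → Bool
  | [] => false
  | patron :: rest =>
      let patron_value := d.getD patron 0 + 1
      if patron_value > allowedServings then true
      else limitedServingsGo allowedServings (d.insert patron patron_value) rest

def limitedServings (patrons : List String) (allowedServings : Int) : Bool :=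
  limitedServingsGo allowedServings PySem.Dict.empty patrons

-- ===== PORT B =====
def limitedServings_alt (patrons : List String) (allowedServings : Int) : Bool :=
  patrons.any (fun p => decide ((PySem.List.count patrons p : Int) > allowedServings))

-- ===== PRECONDITION & SPEC =====
def Spec_limitedServings (patrons : List String) (allowedServings : Int) (out : Bool) : Prop := out = limitedServings_alt patrons allowedServings
instance (patrons : List String) (allowedServings : Int) (out : Bool) : Decidable (Spec_limitedServings patrons allowedServings out) := by unfold Spec_limitedServings; infer_instance

-- ===== CLAIM (what is proved, stated in full; the proofs are below) =====
def Claim_equal_limitedServings : Prop := ∀ (patrons : List String) (allowedServings : Int), Dom_limitedServings patrons allowedServings → Spec_limitedServings patrons allowedServings (limitedServings patrons allowedServings)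

-- ===== LEMMAS AND PROOFS =====

-- A's loop, started from any dict d, answers: does some patron's d-count plus its
-- remaining total count exceed the limit? (counts only grow, so the early exit at a
-- running count is equivalent to checking the final count)
lemma limitedServingsGo_eq (k : Int) :
    ∀ (rest : List String) (d : PySem.Dict String Int),
      limitedServingsGo k d rest
        = rest.any (fun p => decide (d.getD p 0 + (rest.count p : Int) > k)) := by
  intro rest
  induction rest with
  | nil => intro d; rfl
  | cons p t ih =>
    intro d
    simp only [limitedServingsGo]
    by_cases h : d.getD p 0 + 1 > k
    · have h1 : (1 : Int) ≤ ((p :: t).count p : Int) := by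
        have : 1 ≤ (p :: t).count p := by simp
        exact_mod_cast this
      simp only [h, if_true, List.any_cons]
      have hd : decide (d.getD p 0 + ((p :: t).count p : Int) > k) = true := by
        simp only [decide_eq_true_eq]
        omega
      rw [hd, Bool.true_or]
    · have hfun : ∀ q : String,
          (decide ((d.insert p (d.getD p 0 + 1)).getD q 0 + (t.count q : Int) > k))
            = (decide (d.getD q 0 + ((p :: t).count q : Int) > k)) := by
        intro q
        rw [PySem.Dict.getD_insert]
        by_cases hq : q = p
        · subst hq
          rw [decide_eq_decide]
          simp only [List.count_cons_self]
          push_cast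
          omega
        · have hq' : p ≠ q := fun hpq => hq hpq.symm
          simp [hq, hq']
      simp only [h, if_false, ih]
      rw [congrArg t.any (funext hfun), List.any_cons]
      by_cases hg : d.getD p 0 + ((p :: t).count p : Int) > k
      · have hp : p ∈ t := by
          by_contra hp
          have hc : (p :: t).count p = 1 := by
            simp [List.count_eq_zero_of_not_mem hp]
          rw [hc] at hg
          push_cast at hg
          omega
        have hany : t.any (fun q => decide (d.getD q 0 + ((p :: t).count q : Int) > k)) = true :=
          List.any_eq_true.mpr ⟨p, hp, by simpa using hg⟩
        rw [hany, Bool.or_true]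
      · have hd : decide (d.getD p 0 + ((p :: t).count p : Int) > k) = false := by
          simp only [decide_eq_false_iff_not]
          exact hg
        rw [hd, Bool.false_or]

-- ===== VERDICT (by name: the statement is the Claim_ definition above) =====
theorem limitedServings_spec : Claim_equal_limitedServings := by
  intro patrons k _
  unfold Spec_limitedServings limitedServings limitedServings_alt
  rw [limitedServingsGo_eq]
  refine congrArg _ (funext fun p => ?_)
  simp [PySem.Dict.getD_empty, PySem.List.count_eq]
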